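-- pv_equiv track=rewrite | github.com/LDVJ/Daily-Practice-Python- | markssummary.py | count_pass_fail
-- ===== SOURCE A (Python) =====
-- def count_pass_fail(marks, pass_marks=50):
--     pass_count = 0
--     fail_count = 0
--     for i in marks:
--         if i >= pass_marks:
--             pass_count += 1
--         else:
--             fail_count += 1
--     return pass_count, fail_count
-- ===== SOURCE B (Python) =====
-- def count_pass_fail(marks, pass_marks=50):
--     xs = sorted(marks)
--     lo, hi = 0, len(xs)
--     while lo < hi:
--         mid = (lo + hi) // 2
--         if xs[mid] >= pass_marks:
--             hi = mid
--         else: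
--             lo = mid + 1
--     return len(xs) - lo, lo
-- ===== Notes on version B (the rewrite author's own statement) =====
-- stated objective: alternative
-- what changed: Sorts the marks and then binary-searches for the first passing position, reading both counts off the partition index, instead of scanning with two branch-incremented counters.
import Mathlib
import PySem

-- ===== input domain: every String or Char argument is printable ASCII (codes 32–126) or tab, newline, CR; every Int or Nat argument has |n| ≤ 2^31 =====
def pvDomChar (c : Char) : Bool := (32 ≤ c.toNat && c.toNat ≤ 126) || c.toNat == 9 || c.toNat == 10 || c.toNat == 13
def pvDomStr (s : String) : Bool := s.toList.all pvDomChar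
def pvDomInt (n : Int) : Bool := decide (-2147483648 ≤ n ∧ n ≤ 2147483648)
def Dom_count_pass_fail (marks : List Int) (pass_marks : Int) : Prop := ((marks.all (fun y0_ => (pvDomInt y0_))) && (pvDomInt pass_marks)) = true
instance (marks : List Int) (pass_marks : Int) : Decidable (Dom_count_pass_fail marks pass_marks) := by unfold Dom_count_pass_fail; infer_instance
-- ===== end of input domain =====

-- B sorts the marks and binary-searches the partition point instead of A's two-counter scan; objective: alternative algorithm.

-- ===== PORT A =====
-- Port of A: fold over marks carrying both counters, branching each step.
def count_pass_fail (marks : List Int) (pass_marks : Int) : Int × Int :=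
  marks.foldl (fun (st : Int × Int) i =>
    if i ≥ pass_marks then (st.1 + 1, st.2) else (st.1, st.2 + 1)) (0, 0)

-- ===== PORT B =====
-- Source B's while loop as recursion on hi - lo; xs[mid] is always in range (lo ≤ mid < hi ≤ len), ported as getD.
def pvBsearch (xs : List Int) (pass_marks : Int) (lo hi : Nat) : Nat :=
  if _h : lo < hi then
    let mid := (lo + hi) / 2
    if xs.getD mid 0 ≥ pass_marks then pvBsearch xs pass_marks lo mid
    else pvBsearch xs pass_marks (mid + 1) hi
  else lo
termination_by hi - lo
decreasing_by all_goals omega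

-- Port of B: sort, binary-search the first passing index, read both counts off it.
def count_pass_fail_alt (marks : List Int) (pass_marks : Int) : Int × Int :=
  let xs := PySem.List.sorted marks (fun x => x) false
  let lo := pvBsearch xs pass_marks 0 xs.length
  ((xs.length : Int) - (lo : Int), (lo : Int))

-- ===== PRECONDITION & SPEC =====
def Spec_count_pass_fail (marks : List Int) (pass_marks : Int) (out : Int × Int) : Prop := out = count_pass_fail_alt marks pass_marks
instance (marks : List Int) (pass_marks : Int) (out : Int × Int) : Decidable (Spec_count_pass_fail marks pass_marks out) := by unfold Spec_count_pass_fail; infer_instance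

-- ===== CLAIM =====
def Claim_equal_count_pass_fail : Prop := ∀ (marks : List Int) (pass_marks : Int), Dom_count_pass_fail marks pass_marks → Spec_count_pass_fail marks pass_marks (count_pass_fail marks pass_marks)

-- ===== LEMMAS AND PROOFS =====

-- A's fold computes the two countP's.
theorem pv_fold_eq (marks : List Int) (p a b : Int) :
    marks.foldl (fun (st : Int × Int) i =>
      if i ≥ p then (st.1 + 1, st.2) else (st.1, st.2 + 1)) (a, b)
    = (a + (marks.countP (fun m => decide (p ≤ m)) : Int),
       b + (marks.countP (fun m => decide (m < p)) : Int)) := by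
  induction marks generalizing a b with
  | nil => simp
  | cons x xs ih =>
    simp only [List.foldl_cons, List.countP_cons]
    by_cases h : p ≤ x
    · have h2 : ¬ (x < p) := by omega
      simp only [ge_iff_le, h, if_true, ih, h2, decide_true, decide_false]
      refine Prod.ext ?_ ?_ <;> push_cast <;> ring
    · have h2 : x < p := by omega
      simp only [ge_iff_le, h, if_false, ih, h2, decide_true, decide_false]
      refine Prod.ext ?_ ?_ <;> push_cast <;> ring

-- binary-search invariant: on a list whose getD-values are partitioned at [lo,hi), the result is the partition point.
theorem pv_bsearch_inv (xs : List Int) (p : Int)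
    (hmono : ∀ i j : Nat, i ≤ j → j < xs.length → xs.getD i 0 ≤ xs.getD j 0) :
    ∀ lo hi : Nat, lo ≤ hi → hi ≤ xs.length →
    (∀ i : Nat, i < lo → xs.getD i 0 < p) →
    (∀ i : Nat, hi ≤ i → i < xs.length → p ≤ xs.getD i 0) →
    (∀ i : Nat, i < pvBsearch xs p lo hi → xs.getD i 0 < p) ∧
    (∀ i : Nat, pvBsearch xs p lo hi ≤ i → i < xs.length → p ≤ xs.getD i 0) ∧
    pvBsearch xs p lo hi ≤ xs.length := by
  intro lo hi
  induction hn : hi - lo using Nat.strong_induction_on generalizing lo hi with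
  | _ n ih =>
    intro hlh hhl hpre hpost
    rw [pvBsearch]
    by_cases h : lo < hi
    · simp only [h, dif_pos]
      set mid := (lo + hi) / 2 with hmid
      have hmlt : mid < hi := by omega
      have hmge : lo ≤ mid := by omega
      have hmlen : mid < xs.length := by omega
      by_cases hc : xs.getD mid 0 ≥ p
      · simp only [hc, if_pos]
        exact ih (mid - lo) (by omega) lo mid rfl (by omega) (by omega) hpre
          (fun i hi1 hi2 => le_trans hc (hmono mid i hi1 hi2))
      · simp only [hc, if_neg, not_false_iff]
        refine ih (hi - (mid + 1)) (by omega) (mid + 1) hi rfl (by omega) hhl ?_ hpost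
        intro i hilt
        have := hmono i mid (by omega) hmlen
        omega
    · simp only [h, dif_neg, not_false_iff]
      have : lo = hi := by omega
      exact ⟨hpre, fun i h1 h2 => hpost i (by omega) h2, by omega⟩

-- a partition point equals the countP of the strictly-below predicate.
theorem pv_partition_countP (xs : List Int) (p : Int) (r : Nat)
    (hr : r ≤ xs.length)
    (h1 : ∀ i : Nat, i < r → xs.getD i 0 < p)
    (h2 : ∀ i : Nat, r ≤ i → i < xs.length → p ≤ xs.getD i 0) :
    xs.countP (fun m => decide (m < p)) = r := by
  induction xs generalizing r with
  | nil => simp only [List.countP_nil]; simp at hr; omega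
  | cons x t ih =>
    simp only [List.countP_cons]
    cases r with
    | zero =>
      have hx : p ≤ x := by simpa using h2 0 (Nat.zero_le _) (by simp)
      have hnx : ¬ (x < p) := by omega
      simp only [hnx, decide_false, if_false]
      have : t.countP (fun m => decide (m < p)) = 0 := by
        rw [List.countP_eq_zero]
        intro m hm
        obtain ⟨i, hilen, hig⟩ := List.getElem_of_mem hm
        have := h2 (i + 1) (Nat.zero_le _ |>.trans (Nat.le_add_left _ _)) (by simpa using Nat.succ_lt_succ hilen)
        simp only [List.getD_cons_succ] at this
        rw [List.getD_eq_getElem t 0 hilen, hig] at this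
        simp only [decide_eq_true_eq]
        omega
      simp [this]
    | succ r' =>
      have hx : x < p := by simpa using h1 0 (Nat.succ_pos _)
      simp only [hx, decide_true, if_true]
      have := ih r' (by simpa using hr)
        (fun i hi => by simpa using h1 (i + 1) (Nat.succ_lt_succ hi))
        (fun i hi1 hi2 => by simpa using h2 (i + 1) (Nat.succ_le_succ hi1) (by simpa using Nat.succ_lt_succ hi2))
      omega

-- the two countP's of complementary predicates sum to the length.
theorem pv_countP_sum (l : List Int) (p : Int) :
    l.countP (fun m => decide (p ≤ m)) + l.countP (fun m => decide (m < p)) = l.length := by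
  induction l with
  | nil => simp
  | cons x t ih =>
    simp only [List.countP_cons, List.length_cons]
    by_cases h : p ≤ x
    · have h2 : ¬ (x < p) := by omega
      simp only [h, h2, decide_true, decide_false, if_true, Bool.false_eq_true, if_false]
      omega
    · have h2 : x < p := by omega
      simp only [h, h2, decide_true, decide_false, if_true, Bool.false_eq_true, if_false]
      omega

-- ===== VERDICT =====
theorem count_pass_fail_spec : Claim_equal_count_pass_fail := by
  intro marks p _
  unfold Spec_count_pass_fail count_pass_fail count_pass_fail_alt
  set xs := PySem.List.sorted marks (fun x => x) false with hxs
  have hperm : xs.Perm marks := PySem.List.sorted_perm marks (fun x => x) false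
  have hmono : ∀ i j : Nat, i ≤ j → j < xs.length → xs.getD i 0 ≤ xs.getD j 0 := by
    intro i j hij hj
    rw [List.getD_eq_getElem xs 0 (lt_of_le_of_lt hij hj), List.getD_eq_getElem xs 0 hj]
    exact PySem.List.sorted_id_getElem_mono marks hij hj
  obtain ⟨h1, h2, h3⟩ := pv_bsearch_inv xs p hmono 0 xs.length (Nat.zero_le _) le_rfl
    (by omega) (by omega)
  set r := pvBsearch xs p 0 xs.length with hrdef
  have hcount : xs.countP (fun m => decide (m < p)) = r := pv_partition_countP xs p r h3 h1 h2
  have hcm : marks.countP (fun m => decide (m < p)) = r := by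
    rw [← hperm.countP_eq]; exact hcount
  have hlen : marks.length = xs.length := (hperm.length_eq).symm
  have hsum := pv_countP_sum marks p
  rw [pv_fold_eq]
  refine Prod.ext ?_ ?_ <;> simp only [zero_add] <;> omega
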